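-- pv_equiv track=rewrite | github.com/allenai/codescientist | example_papers/code4.resistorsubstitutionadvisor.py | _generate_connection_patterns
-- ===== SOURCE A (Python) =====
-- from typing import List, Dict, Tuple
--
-- def _generate_connection_patterns(n: int) -> List[List[str]]:
--     if n <= 1:
--         return [[]]
--     patterns = []
--     for i in range(2 ** (n-1)):
--         pattern = []
--         for j in range(n-1):
--             if (i >> j) & 1:
--                 pattern.append('parallel')
--             else:
--                 pattern.append('series')
--         patterns.append(pattern)
--     return patterns
-- ===== SOURCE B (Python) =====
-- def _generate_connection_patterns(n):
--     if n <= 1: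
--         return [[]]
--     sub = _generate_connection_patterns(n - 1)
--     return [p + ['series'] for p in sub] + [p + ['parallel'] for p in sub]
-- ===== Notes on version B (the rewrite author's own statement) =====
-- stated objective: simpler
-- what changed: Replaces A's counter-plus-bit-extraction double loop (enumerating i in range(2**(n-1)) and decoding each bit of i) with a structural recursion that doubles the pattern list once per slot, appending the series half before the parallel half to reproduce A's LSB-fastest ordering.
import Mathlib
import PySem

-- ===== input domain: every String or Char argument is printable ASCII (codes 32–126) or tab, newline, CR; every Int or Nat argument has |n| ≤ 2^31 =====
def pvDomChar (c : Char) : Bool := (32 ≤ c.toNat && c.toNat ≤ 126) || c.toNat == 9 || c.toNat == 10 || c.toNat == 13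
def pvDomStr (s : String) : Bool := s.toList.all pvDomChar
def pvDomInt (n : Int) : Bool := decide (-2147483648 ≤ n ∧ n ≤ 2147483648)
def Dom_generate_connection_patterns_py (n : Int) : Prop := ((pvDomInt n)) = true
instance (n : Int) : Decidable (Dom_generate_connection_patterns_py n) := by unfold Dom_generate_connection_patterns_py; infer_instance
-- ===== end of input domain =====

-- B replaces A's counter/bit-decoding double loop by a structural recursion doubling the
-- list once per slot (series half first, matching A's LSB-fastest order); objective: simpler.

-- ===== PORT A =====
-- literal port of A: loop i over range(2**(n-1)); inner loop j over range(n-1);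
-- '(i >> j) & 1' is computed on Nat ((i.toNat >>> j.toNat) &&& 1): i, j are nonnegative there, so this is exact.
def generate_connection_patterns_py (n : Int) : List (List String) :=
  if n ≤ 1 then [[]]
  else
    (PySem.List.pyRange 0 ((2 : Int) ^ (n - 1).toNat) 1).foldl
      (fun patterns i =>
        patterns ++
          [(PySem.List.pyRange 0 (n - 1) 1).foldl
            (fun pattern j =>
              pattern ++ [if (i.toNat >>> j.toNat) &&& 1 == 1 then "parallel" else "series"])
            []])
      []

-- ===== PORT B =====
def generate_connection_patterns_py_alt (n : Int) : List (List String) :=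
  if n ≤ 1 then [[]]
  else
    let sub := generate_connection_patterns_py_alt (n - 1)
    sub.map (· ++ ["series"]) ++ sub.map (· ++ ["parallel"])
termination_by n.toNat
decreasing_by simp_wf; omega

-- ===== PRECONDITION & SPEC =====
def Spec_generate_connection_patterns_py (n : Int) (out : List (List String)) : Prop := out = generate_connection_patterns_py_alt n
instance (n : Int) (out : List (List String)) : Decidable (Spec_generate_connection_patterns_py n out) := by unfold Spec_generate_connection_patterns_py; infer_instance

-- ===== CLAIM (what is proved, stated in full; the proofs are below) =====
def Claim_equal_generate_connection_patterns_py : Prop := ∀ (n : Int), Dom_generate_connection_patterns_py n → Spec_generate_connection_patterns_py n (generate_connection_patterns_py n)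

-- ===== LEMMAS AND PROOFS =====

-- canonical form: the j-th label of row i, a row of m labels, and the full table for m slots
def pvBitStr (i j : Nat) : String := if (i >>> j) &&& 1 == 1 then "parallel" else "series"
def pvRow (m i : Nat) : List String := (List.range m).map (pvBitStr i)
def pvTable (m : Nat) : List (List String) := (List.range (2 ^ m)).map (pvRow m)

theorem pvBit_eq_mod (i j : Nat) : ((i >>> j) &&& 1 == 1) = (i / 2 ^ j % 2 == 1) := by
  rw [Nat.shiftRight_eq_div_pow, Nat.and_one_is_mod]

theorem pvBitStr_high_zero {m i : Nat} (h : i < 2 ^ m) : pvBitStr i m = "series" := by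
  unfold pvBitStr
  rw [pvBit_eq_mod, Nat.div_eq_of_lt h]
  simp

theorem pvBitStr_high_one {m i : Nat} (h : i < 2 ^ m) : pvBitStr (2 ^ m + i) m = "parallel" := by
  unfold pvBitStr
  rw [pvBit_eq_mod]
  have hd : (2 ^ m + i) / 2 ^ m = 1 + i / 2 ^ m := by
    have := Nat.mul_add_div (Nat.two_pow_pos m) 1 i
    simpa using this
  rw [hd, Nat.div_eq_of_lt h]
  simp

theorem pvBitStr_low {m i j : Nat} (hj : j < m) (_hi : i < 2 ^ m) :
    pvBitStr (2 ^ m + i) j = pvBitStr i j := by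
  unfold pvBitStr
  rw [pvBit_eq_mod, pvBit_eq_mod]
  have hsplit : 2 ^ m = 2 ^ j * 2 ^ (m - j) := by
    rw [← pow_add]; congr 1; omega
  have hd : (2 ^ m + i) / 2 ^ j = 2 ^ (m - j) + i / 2 ^ j := by
    rw [hsplit, Nat.mul_add_div (Nat.two_pow_pos j)]
  rw [hd]
  have heven : 2 ^ (m - j) = 2 * 2 ^ (m - j - 1) := by
    rw [← pow_succ']; congr 1; omega
  rw [heven, Nat.mul_add_mod]

theorem pvRow_succ_low {m i : Nat} (h : i < 2 ^ m) :
    pvRow (m + 1) i = pvRow m i ++ ["series"] := by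
  unfold pvRow
  rw [List.range_succ, List.map_append]
  simp [pvBitStr_high_zero h]

theorem pvRow_succ_high {m i : Nat} (h : i < 2 ^ m) :
    pvRow (m + 1) (2 ^ m + i) = pvRow m i ++ ["parallel"] := by
  unfold pvRow
  rw [List.range_succ, List.map_append]
  simp only [List.map_cons, List.map_nil, pvBitStr_high_one h]
  congr 1
  apply List.map_congr_left
  intro j hj
  exact pvBitStr_low (List.mem_range.mp hj) h

theorem pvTable_succ (m : Nat) :
    pvTable (m + 1) = (pvTable m).map (· ++ ["series"]) ++ (pvTable m).map (· ++ ["parallel"]) := by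
  unfold pvTable
  have h2 : 2 ^ (m + 1) = 2 ^ m + 2 ^ m := by ring
  rw [h2, List.range_add, List.map_append, List.map_map, List.map_map, List.map_map]
  congr 1
  · apply List.map_congr_left
    intro i hi
    exact pvRow_succ_low (List.mem_range.mp hi)
  · apply List.map_congr_left
    intro i hi
    exact pvRow_succ_high (List.mem_range.mp hi)

theorem pvAlt_eq (k : Nat) : generate_connection_patterns_py_alt ((k : Int) + 1) = pvTable k := by
  induction k with
  | zero =>
    rw [generate_connection_patterns_py_alt]
    simp [pvTable, pvRow]
  | succ k ih =>
    rw [generate_connection_patterns_py_alt]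
    push_cast
    rw [if_neg (by omega)]
    have harg : ((k : Int) + 1 + 1) - 1 = (k : Int) + 1 := by ring
    rw [harg, ih, pvTable_succ]

theorem pvA_eq {n : Int} (h : ¬ n ≤ 1) : generate_connection_patterns_py n = pvTable (n - 1).toNat := by
  unfold generate_connection_patterns_py
  rw [if_neg h]
  set m : Nat := (n - 1).toNat with hm
  have hn1 : n - 1 = (m : Int) := by omega
  -- inner loop = pvRow
  have hinner : ∀ i : Int,
      (PySem.List.pyRange 0 (n - 1) 1).foldl
        (fun pattern j =>
          pattern ++ [if (i.toNat >>> j.toNat) &&& 1 == 1 then "parallel" else "series"]) []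
      = pvRow m i.toNat := by
    intro i
    rw [PySem.List.foldl_append_singleton_eq_map, hn1, PySem.List.pyRange_one]
    simp only [Int.sub_zero, Int.toNat_natCast, List.map_map, List.nil_append]
    unfold pvRow
    apply List.map_congr_left
    intro j _
    simp [pvBitStr, Function.comp]
  rw [PySem.List.foldl_append_singleton_eq_map, PySem.List.pyRange_one 0 ((2 : Int) ^ m)]
  simp only [Int.sub_zero, List.nil_append]
  have hpow : ((2 : Int) ^ m).toNat = 2 ^ m := by
    rw [show ((2 : Int) ^ m) = ((2 ^ m : Nat) : Int) by push_cast; ring, Int.toNat_natCast]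
  rw [hpow, List.map_map]
  unfold pvTable
  apply List.map_congr_left
  intro i _
  simp only [Function.comp]
  rw [hinner]
  simp

-- ===== VERDICT (by name: the statement is the Claim_ definition above) =====
theorem generate_connection_patterns_py_spec : Claim_equal_generate_connection_patterns_py := by
  intro n _
  unfold Spec_generate_connection_patterns_py
  by_cases h : n ≤ 1
  · rw [generate_connection_patterns_py, generate_connection_patterns_py_alt, if_pos h, if_pos h]
  · have hk : n = ((n - 1).toNat : Int) + 1 := by omega
    rw [pvA_eq h, hk, pvAlt_eq]
    congr 1
    omega
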